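-- pv_equiv track=rewrite | github.com/MasayoshiIwamoto/picker2paper | cdk_display_pipeline/lambda/get_next_image/handler.py | _align_state_with_keys
-- ===== SOURCE A (Python) =====
-- from typing import Dict, List
--
-- def _align_state_with_keys(state: Dict[str, int], keys: List[str]) -> bool:
--     changed = False
--     for key in keys:
--         if key not in state:
--             state[key] = 0
--             changed = True
--     for key in list(state.keys()):
--         if key not in keys:
--             state.pop(key, None)
--             changed = True
--     return changed
-- ===== SOURCE B (Python) =====
-- def _align_state_with_keys(state, keys):
--     # Build the desired table up front, compare key sets, then reconcile in place.
--     # Mutates `state` like A does (same final mapping; insertion order may differ).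
--     new_state = {k: state.get(k, 0) for k in keys}
--     changed = set(new_state) != set(state)
--     state.clear()
--     state.update(new_state)
--     return changed
-- ===== Notes on version B (the rewrite author's own statement) =====
-- stated objective: faster
-- what changed: Replaces A's two scan-and-mutate loops (the second testing 'key not in keys' by a linear list scan per entry) with building the desired dict in one comprehension, deciding 'changed' by a single key-set comparison, and reconciling the dict in place via clear()+update().
import Mathlib
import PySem

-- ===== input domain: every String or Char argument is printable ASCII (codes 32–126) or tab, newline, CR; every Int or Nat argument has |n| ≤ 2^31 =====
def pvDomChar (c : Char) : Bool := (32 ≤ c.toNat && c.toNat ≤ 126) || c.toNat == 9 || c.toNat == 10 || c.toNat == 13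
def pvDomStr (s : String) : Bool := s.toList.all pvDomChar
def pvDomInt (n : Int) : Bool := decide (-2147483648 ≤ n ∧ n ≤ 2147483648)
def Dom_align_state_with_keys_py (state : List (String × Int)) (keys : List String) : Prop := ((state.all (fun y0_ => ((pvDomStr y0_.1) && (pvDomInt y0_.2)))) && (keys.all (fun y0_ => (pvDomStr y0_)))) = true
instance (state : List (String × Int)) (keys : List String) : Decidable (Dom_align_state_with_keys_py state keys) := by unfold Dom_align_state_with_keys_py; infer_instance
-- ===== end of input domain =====

-- B replaces A's two scan-and-mutate loops by building the desired dict up front and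
-- deciding `changed` with one key-set comparison (objective: simpler). Both Pythons
-- mutate `state` in place to the same final mapping (B via clear+update, so insertion
-- order may differ); the equivalence proved here is about the RETURN value.

-- ===== PORT A =====
def align_state_with_keys_py (state : List (String × Int)) (keys : List String) : Bool :=
  -- changed = False; for key in keys: if key not in state: state[key] = 0; changed = True
  let r1 := keys.foldl (fun (acc : PySem.Dict String Int × Bool) key =>
    if acc.1.contains key then acc else (acc.1.insert key 0, true)) (PySem.Dict.mk state, false)
  -- for key in list(state.keys()): if key not in keys: state.pop(key, None); changed = True
  let r2 := r1.1.keys.foldl (fun (acc : PySem.Dict String Int × Bool) key =>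
    if keys.contains key then acc else (acc.1.erase key, true)) r1
  r2.2

-- ===== PORT B =====
def align_state_with_keys_py_alt (state : List (String × Int)) (keys : List String) : Bool :=
  -- new_state = {k: state.get(k, 0) for k in keys}
  let newState := keys.foldl (fun (d : PySem.Dict String Int) k =>
    d.insert k ((PySem.Dict.mk state).getD k 0)) PySem.Dict.empty
  -- changed = set(new_state) != set(state)   (state.clear(); state.update(new_state) mutates only)
  !(PySem.Set.equal (PySem.Set.ofList newState.keys) (PySem.Set.ofList ((PySem.Dict.mk state).keys)))

-- ===== PRECONDITION & SPEC =====
def Spec_align_state_with_keys_py (state : List (String × Int)) (keys : List String) (out : Bool) : Prop := out = align_state_with_keys_py_alt state keys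
instance (state : List (String × Int)) (keys : List String) (out : Bool) : Decidable (Spec_align_state_with_keys_py state keys out) := by unfold Spec_align_state_with_keys_py; infer_instance

-- ===== CLAIM (what is proved, stated in full; the proofs are below) =====
def Claim_equal_align_state_with_keys_py : Prop := ∀ (state : List (String × Int)) (keys : List String), Dom_align_state_with_keys_py state keys → Spec_align_state_with_keys_py state keys (align_state_with_keys_py state keys)

-- ===== LEMMAS AND PROOFS =====

-- A's second loop: the tested condition only reads `keys`, so the flag it returns is
-- the initial flag OR'd with "some iterated key is not in keys".
theorem loop2_snd (keys : List String) (L : List String)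
    (d : PySem.Dict String Int) (b : Bool) :
    (L.foldl (fun (acc : PySem.Dict String Int × Bool) key =>
      if keys.contains key then acc else (acc.1.erase key, true)) (d, b)).2
      = (b || L.any (fun k => !keys.contains k)) := by
  induction L generalizing d b with
  | nil => simp
  | cons k rest ih =>
    rw [List.foldl_cons]
    by_cases h : k ∈ keys
    · rw [if_pos (by simpa using h), ih]
      simp [h]
    · rw [if_neg (by simpa using h), ih]
      simp [h]

-- A's first loop: the flag it returns is the initial flag OR'd with "some key is
-- missing from the initial dict".
theorem loop1_snd (ks : List String) (d : PySem.Dict String Int) (b : Bool) :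
    (ks.foldl (fun (acc : PySem.Dict String Int × Bool) key =>
      if acc.1.contains key then acc else (acc.1.insert key 0, true)) (d, b)).2
      = (b || ks.any (fun k => !d.contains k)) := by
  induction ks generalizing d b with
  | nil => simp
  | cons k rest ih =>
    rw [List.foldl_cons]
    by_cases h : d.contains k = true
    · rw [if_pos h, ih]
      simp [h]
    · rw [if_neg h, ih]
      simp only [Bool.not_eq_true] at h
      simp [h]

-- A's first loop: membership in the resulting dict is membership in the initial dict
-- or in the key list.
theorem loop1_contains (ks : List String) (d : PySem.Dict String Int) (b : Bool)
    (x : String) :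
    ((ks.foldl (fun (acc : PySem.Dict String Int × Bool) key =>
      if acc.1.contains key then acc else (acc.1.insert key 0, true)) (d, b)).1).contains x
      = (d.contains x || ks.contains x) := by
  induction ks generalizing d b with
  | nil => simp
  | cons k rest ih =>
    rw [List.foldl_cons]
    by_cases h : d.contains k = true
    · rw [if_pos h, ih]
      by_cases hx : x = k
      · subst hx; simp [h]
      · simp [hx]
    · rw [if_neg h, ih, PySem.Dict.contains_insert]
      simp [beq_eq_decide, Bool.or_comm, Bool.or_left_comm, Bool.or_assoc]

-- B's dict comprehension: membership in the built dict is membership in the key list.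
theorem comp_contains (ks : List String) (d : PySem.Dict String Int)
    (g : String → Int) (x : String) :
    ((ks.foldl (fun (d : PySem.Dict String Int) k => d.insert k (g k)) d).contains x)
      = (d.contains x || ks.contains x) := by
  induction ks generalizing d with
  | nil => simp
  | cons k rest ih =>
    rw [List.foldl_cons, ih, PySem.Dict.contains_insert]
    simp [beq_eq_decide, Bool.or_comm, Bool.or_left_comm, Bool.or_assoc]

-- ===== VERDICT (by name: the statement is the Claim_ definition above) =====
theorem align_state_with_keys_py_spec : Claim_equal_align_state_with_keys_py := by
  intro state keys _
  unfold Spec_align_state_with_keys_py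
  rw [Bool.eq_iff_iff]
  set d0 : PySem.Dict String Int := PySem.Dict.mk state with hd0
  have hA : align_state_with_keys_py state keys = true ↔
      (∃ x, x ∈ keys ∧ ¬ d0.contains x = true) ∨
      (∃ x, (d0.contains x = true ∨ x ∈ keys) ∧ x ∉ keys) := by
    unfold align_state_with_keys_py
    rw [loop2_snd, loop1_snd]
    simp only [Bool.false_or, Bool.or_eq_true, List.any_eq_true, Bool.not_eq_true',
      ← Bool.not_eq_true]
    constructor
    · rintro (⟨x, hx, hc⟩ | ⟨x, hx, hc⟩)
      · exact Or.inl ⟨x, hx, hc⟩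
      · refine Or.inr ⟨x, ?_, by simpa using hc⟩
        have := (PySem.Dict.contains_iff_mem_keys _ _).mpr hx
        rw [loop1_contains] at this
        rcases Bool.or_eq_true_iff.mp this with h | h
        · exact Or.inl h
        · exact Or.inr (List.contains_iff_mem.mp h)
    · rintro (⟨x, hx, hc⟩ | ⟨x, hx, hc⟩)
      · exact Or.inl ⟨x, hx, hc⟩
      · refine Or.inr ⟨x, ?_, by simpa using hc⟩
        apply (PySem.Dict.contains_iff_mem_keys _ _).mp
        rw [loop1_contains]
        rcases hx with h | h
        · exact Bool.or_eq_true_iff.mpr (Or.inl h)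
        · exact absurd h hc
  have hB : align_state_with_keys_py_alt state keys = true ↔
      ¬ ∀ x : String, x ∈ keys ↔ d0.contains x = true := by
    unfold align_state_with_keys_py_alt
    rw [Bool.not_eq_eq_eq_not, Bool.not_true, ← Bool.not_eq_true]
    rw [show ((PySem.Set.equal _ _ = true) ↔ _) from PySem.Set.equal_iff _ _]
    apply not_congr
    apply forall_congr'
    intro x
    rw [PySem.Set.mem_ofList, PySem.Set.mem_ofList,
      ← PySem.Dict.contains_iff_mem_keys, ← PySem.Dict.contains_iff_mem_keys,
      comp_contains]
    simp [← hd0]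
  rw [hA, hB, not_forall]
  constructor
  · rintro (⟨x, hx, hc⟩ | ⟨x, hx, hc⟩)
    · exact ⟨x, fun h => hc (h.mp hx)⟩
    · rcases hx with h | h
      · exact ⟨x, fun hi => hc (hi.mpr h)⟩
      · exact absurd h hc
  · rintro ⟨x, hx⟩
    by_cases hk : x ∈ keys
    · by_cases hc : d0.contains x = true
      · exact absurd ⟨fun _ => hc, fun _ => hk⟩ hx
      · exact Or.inl ⟨x, hk, hc⟩
    · by_cases hc : d0.contains x = true
      · exact Or.inr ⟨x, Or.inl hc, hk⟩
      · exact absurd ⟨fun h => absurd h hk, fun h => absurd h hc⟩ hx
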